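-- pv_equiv track=rewrite | github.com/dcafplz/AlgorithmStudy | 2.Algorithm/77.Kakao/괄호 변환.py | f
-- ===== SOURCE A (Python) =====
-- def f(str):
--     cnt = 0
--     cor = True
--     for i in range(len(str)):
--         if str[i] == '(':
--             cnt += 1
--         else:
--             cnt -= 1
--             if cnt < 0: cor = False
--
--         if cnt == 0:
--             return i+1, cor
-- ===== SOURCE B (Python) =====
-- def f(str):
--     # pass 1: find the length of the first prefix whose balance returns to 0
--     length = None
--     bal = 0
--     for i in range(len(str)):
--         bal += 1 if str[i] == '(' else -1
--         if bal == 0: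
--             length = i + 1
--             break
--     if length is None:
--         return None  # same implicit None as A when no prefix balances
--     # pass 2: validate str[:length] with a fresh balance
--     bal = 0
--     for ch in str[:length]:
--         bal += 1 if ch == '(' else -1
--         if bal < 0:
--             return length, False
--     return length, True
-- ===== Notes on version B (the rewrite author's own statement) =====
-- stated objective: alternative
-- what changed: A's single combined scan that tracks both the counter and the correctness flag is split into a detect-then-validate decomposition: one pass finds the first balanced prefix length, a second independent pass over str[:length] checks whether the balance ever goes negative.
-- outside the precondition, e.g. on f('(('): A returns None, B returns None; on f(''): A returns None, B returns None
import Mathlib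
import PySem

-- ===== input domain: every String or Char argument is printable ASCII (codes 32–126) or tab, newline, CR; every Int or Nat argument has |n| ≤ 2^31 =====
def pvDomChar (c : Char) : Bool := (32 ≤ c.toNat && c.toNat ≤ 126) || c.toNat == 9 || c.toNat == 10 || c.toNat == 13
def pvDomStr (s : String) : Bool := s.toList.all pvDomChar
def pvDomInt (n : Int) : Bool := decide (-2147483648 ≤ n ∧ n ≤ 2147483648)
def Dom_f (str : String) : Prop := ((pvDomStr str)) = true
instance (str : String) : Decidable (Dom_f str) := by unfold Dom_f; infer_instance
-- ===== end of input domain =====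

-- B replaces A's single combined scan by a detect-then-validate decomposition (two independent passes); same O(n) cost.
-- Pre_f excludes inputs with no balanced prefix, where Python A falls off the loop and returns None (not an int/bool pair).


-- ===== PORT A =====
-- A's single loop: counter cnt, flag cor; return (i+1, cor) at the first cnt = 0.
-- Python returns None when the loop finishes; those inputs are excluded by Pre_f, the port uses (0, true) there.
def fGo : List Char → Int → Bool → Nat → Option (Int × Bool)
  | [], _, _, _ => none
  | c :: cs, cnt, cor, i =>
    let cnt' := if c = '(' then cnt + 1 else cnt - 1
    let cor' := if c = '(' then cor else (if cnt' < 0 then false else cor)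
    if cnt' = 0 then some (((i : Int) + 1), cor') else fGo cs cnt' cor' (i + 1)

def f (str : String) : Int × Bool :=
  match fGo str.toList 0 true 0 with
  | none => (0, true)
  | some r => r

-- ===== PORT B =====
-- pass 1: first index i with running balance 0, recording length = i+1
def fFind : List Char → Int → Nat → Option Nat
  | [], _, _ => none
  | c :: cs, bal, i =>
    let bal' := if c = '(' then bal + 1 else bal - 1
    if bal' = 0 then some (i + 1) else fFind cs bal' (i + 1)

-- pass 2: fresh balance over the prefix; false at the first negative
def fValid : List Char → Int → Bool
  | [], _ => true
  | c :: cs, bal =>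
    let bal' := if c = '(' then bal + 1 else bal - 1
    if bal' < 0 then false else fValid cs bal'

def f_alt (str : String) : Int × Bool :=
  match fFind str.toList 0 0 with
  | none => (0, true)
  | some n => ((n : Int), fValid (str.toList.take n) 0)

-- ===== PRECONDITION & SPEC =====
-- balance of a prefix, used only to state Pre_f
def pvBal (cs : List Char) : Int := cs.foldl (fun a c => a + (if c = '(' then 1 else -1)) 0

-- Pre_f excludes exactly the inputs on which Python A returns None (no prefix has balance 0, incl. the empty string).
def Pre_f (str : String) : Prop :=
  ((List.range str.length).any (fun n => pvBal (str.toList.take (n + 1)) == 0)) = true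
instance (str : String) : Decidable (Pre_f str) := by unfold Pre_f; infer_instance

def pvWitness_f : String := "(()())"

def Spec_f (str : String) (out : Int × Bool) : Prop := out = f_alt str
instance (str : String) (out : Int × Bool) : Decidable (Spec_f str out) := by unfold Spec_f; infer_instance

-- ===== CLAIM (what is proved, stated in full; the proofs are below) =====
def Claim_equal_f : Prop := ∀ (str : String), Dom_f str → Pre_f str → Spec_f str (f str)

-- ===== LEMMAS AND PROOFS =====
theorem fFind_gt : ∀ (cs : List Char) (bal : Int) (i n : Nat), fFind cs bal i = some n → i < n := by
  intro cs
  induction cs with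
  | nil => intro bal i n h; simp [fFind] at h
  | cons c cs ih =>
    intro bal i n h
    simp only [fFind] at h
    split at h <;> split at h <;>
      first
      | (simp_all; omega)
      | (have := ih _ _ _ h; omega)

theorem fGo_eq_find : ∀ (cs : List Char) (cnt : Int) (cor : Bool) (i : Nat),
    (cnt < 0 → cor = false) →
    fGo cs cnt cor i =
      match fFind cs cnt i with
      | none => none
      | some n => some ((n : Int), cor && fValid (cs.take (n - i)) cnt) := by
  intro cs
  induction cs with
  | nil => intro cnt cor i _; simp [fGo, fFind]
  | cons c cs ih =>
    intro cnt cor i hinv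
    by_cases hc : c = '('
    · subst hc
      simp only [fGo, fFind, reduceIte]
      by_cases hz : cnt + 1 = 0
      · have hneg : ¬ cnt + 1 < 0 := by omega
        simp [hz, fValid, hneg]
      · simp only [if_neg hz]
        rw [ih (cnt + 1) cor (i + 1) (fun h => hinv (by omega))]
        cases hf : fFind cs (cnt + 1) (i + 1) with
        | none => rfl
        | some n =>
          have hn := fFind_gt _ _ _ _ hf
          have htake : ('(' :: cs).take (n - i) = '(' :: cs.take (n - (i + 1)) := by
            have : n - i = (n - (i + 1)) + 1 := by omega
            rw [this]; simp
          by_cases h : cnt + 1 < 0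
          · simp [htake, fValid, h, hinv (by omega : cnt < 0)]
          · simp [htake, fValid, h]
    · simp only [fGo, fFind, hc, reduceIte, if_false]
      by_cases hz : cnt - 1 = 0
      · have hneg : ¬ cnt - 1 < 0 := by omega
        simp [hz, hneg, fValid, hc]
      · simp only [if_neg hz]
        rw [ih (cnt - 1) (if cnt - 1 < 0 then false else cor) (i + 1) (by intro h; simp [h])]
        cases hf : fFind cs (cnt - 1) (i + 1) with
        | none => rfl
        | some n =>
          have hn := fFind_gt _ _ _ _ hf
          have htake : (c :: cs).take (n - i) = c :: cs.take (n - (i + 1)) := by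
            have : n - i = (n - (i + 1)) + 1 := by omega
            rw [this]; simp
          by_cases h : cnt - 1 < 0
          · simp [htake, fValid, hc, h]
          · simp [htake, fValid, hc, h]

-- ===== VERDICT (by name: the statement is the Claim_ definition above) =====
theorem f_spec : Claim_equal_f := by
  intro str _ _
  unfold Spec_f f f_alt
  rw [fGo_eq_find str.toList 0 true 0 (by intro h; omega)]
  cases hf : fFind str.toList 0 0 with
  | none => rfl
  | some n => simp
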